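-- pv_equiv track=rewrite | github.com/kyodaisuu/kyodaisuu.github.io | illion/zillion.py | llion
-- ===== SOURCE A (Python) =====
-- ISOLATE = ['', 'mi', 'bi', 'tri', 'quadri',
--            'quinti', 'sexti', 'septi', 'octi', 'noni']
--
-- CW_UNI = ['', 'un', 'duo', 'tre', 'quattuor', 'quin', 'se',
--           'septe', 'octo', 'nove']  # quinqua is changed to quin
--
-- TEN = ['', 'deci', 'viginti', 'triginta', 'quadraginta', 'quinquaginta',
--        'sexaginta', 'septuaginta', 'octoginta', 'nonaginta']
--
-- HUN = ['', 'centi', 'ducenti', 'trecenti', 'quadringenti',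
--        'quingenti', 'sescenti', 'septingenti', 'octingenti', 'nongenti']
--
-- SIMP_UNI = ['', 'un', 'duo', 'tre', 'quattuor',
--             'quin', 'sex', 'septen', 'octo', 'novem']
--
-- PREC_TEN = ['', 'N', 'MS', 'NS', 'NS', 'NS', 'N', 'N', 'MX', '']
--
-- PREC_HUN = ['', 'NX', 'N', 'NS', 'NS', 'NS', 'N', 'N', 'MX', '']
--
-- def llion(n, modified):
--     if n < 1:
--         return 'N<1 is not defined'
--     if n < 10:
--         return ISOLATE[n] + 'llion'
--     name = 'llion'
--     while n > 999:
--         if n % 1000 == 0: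
--             if name == 'llion':
--                 name = 'nillion'
--             else:
--                 name = 'nilli' + name
--         else:
--             if n % 1000 < 10:
--                 name = ISOLATE[n % 1000] + name
--             else:
--                 name = base(n % 1000, modified) + name
--         n = n // 1000
--     if n < 10:
--         name = ISOLATE[n] + 'lli' + name
--     else:
--         name = base(n, modified) + name
--     return name
--
-- def base(n, modified):
--     unit = n % 10
--     ten = (n//10) % 10
--     hun = n//100
--     if ten == 0:
--         prec = PREC_TEN[hun]
--     else:
--         prec = PREC_HUN[ten]
--     if modified:
--         name = SIMP_UNI[unit]
--     else:
--         name = CW_UNI[unit]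
--         if unit == 3 or unit == 6:
--             if 'S' in prec:
--                 name += 's'
--             if 'X' in prec:
--                 if unit == 3:
--                     name = 'tres'
--                 else:
--                     name = 'sex'
--         if unit == 7 or unit == 9:
--             if 'M' in prec:
--                 name += 'm'
--             if 'N' in prec:
--                 name += 'n'
--     name += TEN[ten]
--     name += HUN[hun]
--     return name
-- ===== SOURCE B (Python) =====
-- ISOLATE = ['', 'mi', 'bi', 'tri', 'quadri',
--            'quinti', 'sexti', 'septi', 'octi', 'noni']
--
-- CW_UNI = ['', 'un', 'duo', 'tre', 'quattuor', 'quin', 'se',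
--           'septe', 'octo', 'nove']
--
-- TEN = ['', 'deci', 'viginti', 'triginta', 'quadraginta', 'quinquaginta',
--        'sexaginta', 'septuaginta', 'octoginta', 'nonaginta']
--
-- HUN = ['', 'centi', 'ducenti', 'trecenti', 'quadringenti',
--        'quingenti', 'sescenti', 'septingenti', 'octingenti', 'nongenti']
--
-- SIMP_UNI = ['', 'un', 'duo', 'tre', 'quattuor',
--             'quin', 'sex', 'septen', 'octo', 'novem']
--
-- PREC_TEN = ['', 'N', 'MS', 'NS', 'NS', 'NS', 'N', 'N', 'MX', '']
--
-- PREC_HUN = ['', 'NX', 'N', 'NS', 'NS', 'NS', 'N', 'N', 'MX', '']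
--
--
-- def _prefix(g, modified):
--     # the Latin prefix for one three-digit group g (10 <= g <= 999, or any 0..999)
--     u = g % 10
--     t = g // 10 % 10
--     h = g // 100
--     if modified:
--         head = SIMP_UNI[u]
--     else:
--         marks = PREC_TEN[h] if t == 0 else PREC_HUN[t]
--         head = CW_UNI[u]
--         if u == 3 or u == 6:
--             if 'X' in marks:
--                 head = 'tres' if u == 3 else 'sex'
--             elif 'S' in marks:
--                 head += 's'
--         elif u == 7 or u == 9:
--             head += 'm' if 'M' in marks else 'n' if 'N' in marks else ''
--     return head + TEN[t] + HUN[h]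
--
--
-- def _upper(n, modified):
--     # high-to-low fragments for the base-1000 groups of n (n >= 1), whose
--     # lowest group still sits above the units group
--     if n < 1000:
--         return ISOLATE[n] + 'lli' if n < 10 else _prefix(n, modified)
--     g = n % 1000
--     mid = 'nilli' if g == 0 else ISOLATE[g] if g < 10 else _prefix(g, modified)
--     return _upper(n // 1000, modified) + mid
--
--
-- def llion(n, modified):
--     if n < 1:
--         return 'N<1 is not defined'
--     if n < 10:
--         return ISOLATE[n] + 'llion'
--     if n < 1000:
--         return _prefix(n, modified) + 'llion'
--     g = n % 1000
--     low = 'ni' if g == 0 else ISOLATE[g] if g < 10 else _prefix(g, modified)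
--     return _upper(n // 1000, modified) + low + 'llion'
-- ===== Notes on version B (the rewrite author's own statement) =====
-- stated objective: alternative
-- what changed: B builds the name front-to-back by top-down recursion over the base-1000 groups (highest group first, peeling the lowest group once in llion), with a restructured group-prefix helper using the mutual exclusivity of the assimilation marks, instead of A's bottom-up while loop that prepends onto an accumulator string and detects the lowest group by comparing the accumulated string against 'llion'.
import Mathlib
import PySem

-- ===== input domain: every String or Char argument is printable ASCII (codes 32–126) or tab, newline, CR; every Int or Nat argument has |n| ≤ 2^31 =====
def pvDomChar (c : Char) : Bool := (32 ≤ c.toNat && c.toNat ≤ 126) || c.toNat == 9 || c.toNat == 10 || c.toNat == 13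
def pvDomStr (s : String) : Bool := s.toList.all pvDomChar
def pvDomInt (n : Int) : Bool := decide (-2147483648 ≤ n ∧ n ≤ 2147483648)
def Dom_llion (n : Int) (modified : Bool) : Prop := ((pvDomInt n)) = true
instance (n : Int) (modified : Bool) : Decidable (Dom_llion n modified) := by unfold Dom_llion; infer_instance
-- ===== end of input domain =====

-- B builds the name front-to-back by top-down recursion over the base-1000 groups instead of A's
-- bottom-up prepending loop; objective: alternative decomposition, same cost.

-- ===== PORT A =====
-- Strings are handled as List Char (PySem.Chars) and wrapped with String.mk at the end.
def ISOLATE : List (List Char) :=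
  ["", "mi", "bi", "tri", "quadri", "quinti", "sexti", "septi", "octi", "noni"].map String.toList
def CW_UNI : List (List Char) :=
  ["", "un", "duo", "tre", "quattuor", "quin", "se", "septe", "octo", "nove"].map String.toList
def TEN : List (List Char) :=
  ["", "deci", "viginti", "triginta", "quadraginta", "quinquaginta", "sexaginta", "septuaginta",
   "octoginta", "nonaginta"].map String.toList
def HUN : List (List Char) :=
  ["", "centi", "ducenti", "trecenti", "quadringenti", "quingenti", "sescenti", "septingenti",
   "octingenti", "nongenti"].map String.toList
def SIMP_UNI : List (List Char) :=
  ["", "un", "duo", "tre", "quattuor", "quin", "sex", "septen", "octo", "novem"].map String.toList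
def PREC_TEN : List (List Char) :=
  ["", "N", "MS", "NS", "NS", "NS", "N", "N", "MX", ""].map String.toList
def PREC_HUN : List (List Char) :=
  ["", "NX", "N", "NS", "NS", "NS", "N", "N", "MX", ""].map String.toList

-- xs[i]; every use below has i in range, so the default is never taken (exact there)
def pyIdx (xs : List (List Char)) (i : Int) : List Char := (PySem.List.pyGet? xs i).getD []

-- A's helper 'base'
def baseC (n : Int) (modified : Bool) : List Char :=
  let unit := PySem.Int.mod n 10
  let ten := PySem.Int.mod (PySem.Int.floordiv n 10) 10
  let hun := PySem.Int.floordiv n 100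
  let prec := if ten = 0 then pyIdx PREC_TEN hun else pyIdx PREC_HUN ten
  let name :=
    if modified then pyIdx SIMP_UNI unit
    else
      let name := pyIdx CW_UNI unit
      let name :=
        if unit = 3 ∨ unit = 6 then
          let name := if PySem.Chars.isIn ['S'] prec then name ++ ['s'] else name
          if PySem.Chars.isIn ['X'] prec then
            (if unit = 3 then "tres".toList else "sex".toList)
          else name
        else name
      if unit = 7 ∨ unit = 9 then
        let name := if PySem.Chars.isIn ['M'] prec then name ++ ['m'] else name
        if PySem.Chars.isIn ['N'] prec then name ++ ['n'] else name
      else name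
  name ++ pyIdx TEN ten ++ pyIdx HUN hun

theorem pv_floordiv_lt (n : Int) (h : 0 < n) :
    (PySem.Int.floordiv n 1000).toNat < n.toNat := by
  rw [PySem.Int.floordiv_eq_ediv_of_pos (by norm_num)]
  omega

-- A's while loop followed by A's final if/else, as one tail recursion over the same state
def llionLoop (modified : Bool) (n : Int) (name : List Char) : List Char :=
  if h : 999 < n then
    llionLoop modified (PySem.Int.floordiv n 1000)
      (if PySem.Int.mod n 1000 = 0 then
        (if name = "llion".toList then "nillion".toList else "nilli".toList ++ name)
      else if PySem.Int.mod n 1000 < 10 then pyIdx ISOLATE (PySem.Int.mod n 1000) ++ name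
      else baseC (PySem.Int.mod n 1000) modified ++ name)
  else if n < 10 then pyIdx ISOLATE n ++ "lli".toList ++ name
  else baseC n modified ++ name
termination_by n.toNat
decreasing_by exact pv_floordiv_lt n (by omega)

def llion (n : Int) (modified : Bool) : String :=
  if n < 1 then "N<1 is not defined"
  else if n < 10 then String.mk (pyIdx ISOLATE n ++ "llion".toList)
  else String.mk (llionLoop modified n "llion".toList)

-- ===== PORT B =====
-- Source B's _prefix: the group prefix with the assimilation marks resolved by exclusive branches
def prefixC (g : Int) (modified : Bool) : List Char :=
  let u := PySem.Int.mod g 10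
  let t := PySem.Int.mod (PySem.Int.floordiv g 10) 10
  let h := PySem.Int.floordiv g 100
  let head :=
    if modified then pyIdx SIMP_UNI u
    else
      let marks := if t = 0 then pyIdx PREC_TEN h else pyIdx PREC_HUN t
      let head := pyIdx CW_UNI u
      if u = 3 ∨ u = 6 then
        (if PySem.Chars.isIn ['X'] marks then (if u = 3 then "tres".toList else "sex".toList)
         else if PySem.Chars.isIn ['S'] marks then head ++ ['s']
         else head)
      else if u = 7 ∨ u = 9 then
        head ++ (if PySem.Chars.isIn ['M'] marks then ['m']
                 else if PySem.Chars.isIn ['N'] marks then ['n'] else [])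
      else head
  head ++ pyIdx TEN t ++ pyIdx HUN h

-- Source B's _upper: high-to-low fragments of the groups of n (n ≥ 1), lowest group still interior
def upperC (n : Int) (modified : Bool) : List Char :=
  if hlt : n < 1000 then
    (if n < 10 then pyIdx ISOLATE n ++ "lli".toList else prefixC n modified)
  else
    upperC (PySem.Int.floordiv n 1000) modified ++
      (let g := PySem.Int.mod n 1000
       if g = 0 then "nilli".toList
       else if g < 10 then pyIdx ISOLATE g
       else prefixC g modified)
termination_by n.toNat
decreasing_by exact pv_floordiv_lt n (by omega)

def llion_alt (n : Int) (modified : Bool) : String :=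
  if n < 1 then "N<1 is not defined"
  else if n < 10 then String.mk (pyIdx ISOLATE n ++ "llion".toList)
  else if n < 1000 then String.mk (prefixC n modified ++ "llion".toList)
  else
    let g := PySem.Int.mod n 1000
    let low := if g = 0 then "ni".toList
               else if g < 10 then pyIdx ISOLATE g
               else prefixC g modified
    String.mk (upperC (PySem.Int.floordiv n 1000) modified ++ low ++ "llion".toList)

-- ===== PRECONDITION & SPEC =====
def Spec_llion (n : Int) (modified : Bool) (out : String) : Prop := out = llion_alt n modified
instance (n : Int) (modified : Bool) (out : String) : Decidable (Spec_llion n modified out) := by unfold Spec_llion; infer_instance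

-- ===== CLAIM (what is proved, stated in full; the proofs are below) =====
def Claim_equal_llion : Prop := ∀ (n : Int) (modified : Bool), Dom_llion n modified → Spec_llion n modified (llion n modified)

-- ===== LEMMAS AND PROOFS =====

-- B's prefix helper agrees with A's base on every three-digit group
set_option maxRecDepth 100000 in
theorem base_eq_aux :
    ∀ k ∈ List.range 1000,
      prefixC (k : Nat) true = baseC (k : Nat) true ∧
      prefixC (k : Nat) false = baseC (k : Nat) false := by decide

theorem base_eq (g : Int) (modified : Bool) (h0 : 0 ≤ g) (h9 : g ≤ 999) :
    prefixC g modified = baseC g modified := by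
  have hg : g = ((g.toNat : Nat) : Int) := by omega
  have := base_eq_aux g.toNat (List.mem_range.mpr (by omega))
  rw [hg]
  cases modified
  · exact this.2
  · exact this.1

def interiorFrag (modified : Bool) (g : Int) : List Char :=
  if g = 0 then "nilli".toList
  else if g < 10 then pyIdx ISOLATE g
  else baseC g modified

def topFrag (modified : Bool) (g : Int) : List Char :=
  if g < 10 then pyIdx ISOLATE g ++ "lli".toList else baseC g modified

-- what A's loop prepends above the lowest group, as one recursive string
def hi (modified : Bool) (n : Int) : List Char :=
  if h : 999 < n then
    hi modified (PySem.Int.floordiv n 1000) ++ interiorFrag modified (PySem.Int.mod n 1000)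
  else topFrag modified n
termination_by n.toNat
decreasing_by exact pv_floordiv_lt n (by omega)

theorem pyIdx_ISOLATE_ne_nil (g : Int) (h1 : 1 ≤ g) (h2 : g ≤ 9) :
    pyIdx ISOLATE g ≠ [] := by
  interval_cases g <;> decide

theorem pyIdx_TEN_ne_nil (g : Int) (h1 : 1 ≤ g) (h2 : g ≤ 9) : pyIdx TEN g ≠ [] := by
  interval_cases g <;> decide

theorem pyIdx_HUN_ne_nil (g : Int) (h1 : 1 ≤ g) (h2 : g ≤ 9) : pyIdx HUN g ≠ [] := by
  interval_cases g <;> decide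

theorem baseC_ne_nil (g : Int) (modified : Bool) (h1 : 10 ≤ g) (h2 : g ≤ 999) :
    baseC g modified ≠ [] := by
  have hten : PySem.Int.mod (PySem.Int.floordiv g 10) 10 = g / 10 % 10 := by
    rw [PySem.Int.floordiv_eq_ediv_of_pos (by norm_num),
        PySem.Int.mod_eq_emod_of_pos (by norm_num)]
  have hhun : PySem.Int.floordiv g 100 = g / 100 :=
    PySem.Int.floordiv_eq_ediv_of_pos (by norm_num)
  simp only [baseC, hten, hhun]
  intro hc
  rw [List.append_eq_nil_iff, List.append_eq_nil_iff] at hc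
  by_cases hh : g / 100 = 0
  · exact pyIdx_TEN_ne_nil (g / 10 % 10) (by omega) (by omega) hc.1.2
  · exact pyIdx_HUN_ne_nil (g / 100) (by omega) (by omega) hc.2

theorem interiorFrag_eq (modified : Bool) (g : Int) (name : List Char)
    (hne : name ≠ "llion".toList) :
    (if g = 0 then
        (if name = "llion".toList then "nillion".toList else "nilli".toList ++ name)
      else if g < 10 then pyIdx ISOLATE g ++ name
      else baseC g modified ++ name) = interiorFrag modified g ++ name := by
  unfold interiorFrag
  split_ifs <;> simp_all

-- A's loop (after the first iteration) prepends exactly hi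
theorem llionLoop_eq_hi (modified : Bool) :
    ∀ (k : Nat) (n : Int), n.toNat ≤ k → ∀ name : List Char, 5 < name.length →
      llionLoop modified n name = hi modified n ++ name := by
  intro k
  induction k with
  | zero =>
    intro n hle name _
    have hn : ¬ 999 < n := by omega
    rw [llionLoop, hi, dif_neg hn, dif_neg hn]
    unfold topFrag
    split_ifs <;> simp [List.append_assoc]
  | succ k ih =>
    intro n hle name hlen
    by_cases hn : 999 < n
    · rw [llionLoop, hi, dif_pos hn, dif_pos hn]
      have hne : name ≠ "llion".toList := by
        intro h; rw [h] at hlen; simp at hlen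
      rw [interiorFrag_eq modified _ name hne]
      have hlen' : 5 < (interiorFrag modified (PySem.Int.mod n 1000) ++ name).length := by
        rw [List.length_append]; omega
      have hdec : (PySem.Int.floordiv n 1000).toNat ≤ k := by
        have := pv_floordiv_lt n (by omega); omega
      rw [ih _ hdec _ hlen', List.append_assoc]
    · rw [llionLoop, hi, dif_neg hn, dif_neg hn]
      unfold topFrag
      split_ifs <;> simp [List.append_assoc]

-- B's top-down recursion computes exactly hi
theorem upperC_eq_hi (modified : Bool) :
    ∀ (k : Nat) (n : Int), n.toNat ≤ k → 1 ≤ n → upperC n modified = hi modified n := by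
  intro k
  induction k with
  | zero => intro n hle hpos; omega
  | succ k ih =>
    intro n hle hpos
    by_cases hn : n < 1000
    · rw [upperC, hi, dif_pos hn, dif_neg (by omega : ¬ 999 < n)]
      unfold topFrag
      by_cases h10 : n < 10
      · rw [if_pos h10, if_pos h10]
      · rw [if_neg h10, if_neg h10, base_eq n modified (by omega) (by omega)]
    · have hm : 1 ≤ PySem.Int.floordiv n 1000 := by
        rw [PySem.Int.floordiv_eq_ediv_of_pos (by norm_num)]; omega
      have hg0 : 0 ≤ PySem.Int.mod n 1000 := PySem.Int.mod_nonneg n (by norm_num)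
      have hg9 : PySem.Int.mod n 1000 ≤ 999 := by
        have := PySem.Int.mod_lt n (b := 1000) (by norm_num); omega
      rw [upperC, hi, dif_neg hn, dif_pos (by omega : 999 < n)]
      have hdec : (PySem.Int.floordiv n 1000).toNat ≤ k := by
        have := pv_floordiv_lt n (by omega); omega
      rw [ih _ hdec hm]
      congr 1
      unfold interiorFrag
      simp only []
      split_ifs with h0 h10
      · rfl
      · rfl
      · exact base_eq _ modified hg0 hg9

-- ===== VERDICT (by name: the statement is the Claim_ definition above) =====
theorem llion_spec : Claim_equal_llion := by
  unfold Claim_equal_llion Spec_llion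
  intro n modified _
  unfold llion llion_alt
  by_cases h1 : n < 1
  · rw [if_pos h1, if_pos h1]
  · rw [if_neg h1, if_neg h1]
    by_cases h9 : n < 10
    · rw [if_pos h9, if_pos h9]
    · rw [if_neg h9, if_neg h9]
      by_cases hk : n < 1000
      · rw [if_pos hk, llionLoop, dif_neg (by omega : ¬ 999 < n), if_neg h9,
            base_eq n modified (by omega) (by omega)]
      · rw [if_neg hk]
        simp only []
        have hg0 : 0 ≤ PySem.Int.mod n 1000 := PySem.Int.mod_nonneg n (by norm_num)
        have hg9 : PySem.Int.mod n 1000 ≤ 999 := by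
          have := PySem.Int.mod_lt n (b := 1000) (by norm_num); omega
        have hm : 1 ≤ PySem.Int.floordiv n 1000 := by
          rw [PySem.Int.floordiv_eq_ediv_of_pos (by norm_num)]; omega
        rw [llionLoop, dif_pos (by omega : 999 < n)]
        -- reduce A's first iteration to lowfrag ++ "llion"
        set g := PySem.Int.mod n 1000 with hgdef
        have hlowA :
            (if g = 0 then
                (if "llion".toList = "llion".toList then "nillion".toList
                  else "nilli".toList ++ "llion".toList)
              else if g < 10 then pyIdx ISOLATE g ++ "llion".toList
              else baseC g modified ++ "llion".toList)
            = (if g = 0 then "ni".toList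
               else if g < 10 then pyIdx ISOLATE g
               else prefixC g modified) ++ "llion".toList := by
          by_cases h0 : g = 0
          · rw [if_pos h0, if_pos h0, if_pos rfl]; rfl
          · rw [if_neg h0, if_neg h0]
            by_cases h10 : g < 10
            · rw [if_pos h10, if_pos h10]
            · rw [if_neg h10, if_neg h10, base_eq g modified hg0 hg9]
        rw [hlowA]
        have hlen : 5 < ((if g = 0 then "ni".toList
            else if g < 10 then pyIdx ISOLATE g
            else prefixC g modified) ++ "llion".toList).length := by
          rw [List.length_append]
          have h5 : ("llion".toList).length = 5 := by decide
          have : (if g = 0 then "ni".toList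
              else if g < 10 then pyIdx ISOLATE g
              else prefixC g modified) ≠ [] := by
            split_ifs with h0 h10
            · decide
            · exact pyIdx_ISOLATE_ne_nil g (by omega) (by omega)
            · rw [base_eq g modified hg0 hg9]
              exact baseC_ne_nil g modified (by omega) (by omega)
          have := List.length_pos_iff.mpr this
          omega
        rw [llionLoop_eq_hi modified (PySem.Int.floordiv n 1000).toNat _ (le_refl _) _ hlen]
        rw [upperC_eq_hi modified (PySem.Int.floordiv n 1000).toNat _ (le_refl _) hm,
            List.append_assoc]
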